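-- pv_equiv track=rewrite | github.com/rlawnsh/Algorithm_Study | 17140번_이차원배열과연산.py | r_play
-- ===== SOURCE A (Python) =====
-- from collections import defaultdict
--
-- def r_play(table):
--     for i in range(len(table)):
--         temp = defaultdict(int)
--         for j in table[i]:
--             if j == 0:
--                 continue
--             else:
--                 temp[j] += 1
--         res_temp = list(sorted(temp.items(), key=lambda x:(x[1], x[0]))) # [(2,1), (1,2)]
--         new = []
--         for rt in res_temp:
--             new.extend(rt)
--         table[i] = new
--     return table
-- ===== SOURCE B (Python) =====
-- def r_play(table):
--     for i, row in enumerate(table):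
--         s = sorted(v for v in row if v != 0)
--         pairs = []
--         while s:
--             v = s[0]
--             n = 1
--             while n < len(s) and s[n] == v:
--                 n += 1
--             pairs.append((v, n))
--             s = s[n:]
--         pairs.sort(key=lambda p: (p[1], p[0]))
--         table[i] = [x for p in pairs for x in p]
--     return table
-- ===== Notes on version B (the rewrite author's own statement) =====
-- stated objective: alternative
-- what changed: Per-row counting by defaultdict hash lookups is replaced by sort-then-adjacent run-length scan: the nonzero values are sorted and equal runs are counted by adjacency with a two-pointer loop, then the (value,count) pairs are sorted by (count,value) and flattened; no dictionary at all.
import Mathlib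
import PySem

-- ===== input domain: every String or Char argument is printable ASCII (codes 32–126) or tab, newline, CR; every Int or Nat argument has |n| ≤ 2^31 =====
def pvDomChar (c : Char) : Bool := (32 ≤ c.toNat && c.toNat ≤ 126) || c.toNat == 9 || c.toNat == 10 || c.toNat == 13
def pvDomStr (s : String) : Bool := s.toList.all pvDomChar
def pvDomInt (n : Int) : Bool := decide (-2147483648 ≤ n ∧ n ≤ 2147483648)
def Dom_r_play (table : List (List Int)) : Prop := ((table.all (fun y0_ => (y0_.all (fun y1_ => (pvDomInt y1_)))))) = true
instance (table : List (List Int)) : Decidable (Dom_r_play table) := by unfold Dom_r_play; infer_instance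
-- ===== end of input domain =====

-- B replaces A's per-row defaultdict counting by a sort-then-adjacent run-length scan (objective: alternative).
-- Both Pythons mutate `table` in place identically (reassigning each table[i]); the equivalence proved is about the returned value.

-- ===== PORT A =====
def r_play (table : List (List Int)) : List (List Int) :=
  (PySem.List.pyRange 0 (table.length : Int) 1).foldl
    (fun t i =>
      let row := PySem.List.pyGetD t i []   -- table[i]; i ranges over 0..len(table)-1, always in range
      let temp := row.foldl (fun d j => if j == 0 then d else d.modify j 0 (· + 1)) PySem.Dict.empty
      let res_temp := PySem.List.sorted2 temp.items (fun x => x.2) (fun x => x.1) false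
      let new := res_temp.foldl (fun acc rt => acc ++ [rt.1, rt.2]) []
      t.set i.toNat new)   -- table[i] = new
    table

-- ===== PORT B =====
-- the two-pointer run-length loop of Source B: take the leading run of s[0], emit (value, run length), continue on the rest
def pvRuns : List Int → List (Int × Int)
  | [] => []
  | v :: rest =>
      (v, 1 + ((rest.takeWhile (fun y => y == v)).length : Int)) ::
        pvRuns (rest.dropWhile (fun y => y == v))
termination_by xs => xs.length
decreasing_by
  simp only [List.length_cons]
  exact Nat.lt_succ_of_le (List.length_dropWhile_le _ _)

def r_play_alt (table : List (List Int)) : List (List Int) :=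
  table.map (fun row =>
    let s := PySem.List.sorted (row.filter (fun v => !(v == 0))) (fun v => v) false
    let pairs := PySem.List.sorted2 (pvRuns s) (fun p => p.2) (fun p => p.1) false
    pairs.flatMap (fun p => [p.1, p.2]))

-- ===== PRECONDITION & SPEC =====
def Spec_r_play (table : List (List Int)) (out : List (List Int)) : Prop := out = r_play_alt table
instance (table : List (List Int)) (out : List (List Int)) : Decidable (Spec_r_play table out) := by unfold Spec_r_play; infer_instance

-- ===== CLAIM (what is proved, stated in full; the proofs are below) =====
def Claim_equal_r_play : Prop := ∀ (table : List (List Int)), Dom_r_play table → Spec_r_play table (r_play table)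

-- ===== LEMMAS AND PROOFS =====

-- A's index loop `for i in range(len(table)): table[i] = g(table[i])` maps g over the table
theorem foldl_range_set_map (g : List Int → List Int) :
    ∀ (v u : List (List Int)),
    (PySem.List.pyRange (u.length : Int) (((u ++ v).length : Nat) : Int) 1).foldl
      (fun t i => t.set i.toNat (g (PySem.List.pyGetD t i []))) (u ++ v)
      = u ++ v.map g := by
  intro v
  induction v with
  | nil =>
      intro u
      simp [PySem.List.pyRange]
  | cons x v' ih =>
      intro u
      have hlt : (u.length : Int) < (((u ++ x :: v').length : Nat) : Int) := by
        simp [List.length_append]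
      rw [PySem.List.pyRange_one_cons hlt]
      have hget : PySem.List.pyGetD (u ++ x :: v') ((u.length : Nat) : Int) [] = x := by
        rw [PySem.List.pyGetD_natCast, List.getD_append_right _ _ _ _ (le_refl _)]
        simp
      have hset : (u ++ x :: v').set (((u.length : Nat) : Int)).toNat (g x) = (u ++ [g x]) ++ v' := by
        simp
      simp only [List.foldl_cons, hget, hset]
      have ih' := ih (u ++ [g x])
      have h1 : (((u ++ [g x]).length : Nat) : Int) = (u.length : Int) + 1 := by
        simp
      have h2 : ((((u ++ [g x]) ++ v').length : Nat) : Int) = (((u ++ x :: v').length : Nat) : Int) := by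
        simp [List.length_append]
      rw [h1, h2] at ih'
      rw [ih']
      simp

-- A's dict loop is the counter of the nonzero values
theorem dict_loop_eq_counter (row : List Int) :
    row.foldl (fun d j => if j == 0 then d else d.modify j 0 (· + 1)) PySem.Dict.empty
      = PySem.Dict.counter (row.filter (fun v => !(v == 0))) := by
  have hfun : (fun (d : PySem.Dict Int Int) (j : Int) => if j == 0 then d else d.modify j 0 (· + 1))
      = (fun (d : PySem.Dict Int Int) (j : Int) => if !(j == 0) then d.modify j 0 (· + 1) else d) := by
    funext d j
    cases h : (j == 0)
    · simp
    · simp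
  rw [hfun, PySem.List.foldl_if_eq_foldl_filter]
  rfl

-- sorted2 with keys (snd, fst) is sorted with the lexicographic key
theorem sorted2_eq_sorted_lex (xs : List (Int × Int)) :
    PySem.List.sorted2 xs (fun p => p.2) (fun p => p.1) false
      = PySem.List.sorted xs (fun p => toLex (p.2, p.1)) false := by
  have hcomp : ∀ a b : Int × Int,
      (decide (a.2 < b.2) || (!decide (b.2 < a.2) && decide (a.1 < b.1)))
        = decide ((toLex ((a.2 : Int), (a.1 : Int)) : Lex (Int × Int)) < toLex (b.2, b.1)) := by
    intro a b
    refine Bool.eq_iff_iff.mpr ?_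
    simp only [Bool.or_eq_true, Bool.and_eq_true, Bool.not_eq_true', decide_eq_true_eq,
      decide_eq_false_iff_not]
    rw [Prod.Lex.lt_iff]
    simp only [ofLex_toLex]
    omega
  simp only [PySem.List.sorted2, PySem.List.sorted]
  simp only [Bool.false_eq_true, if_false]
  congr 1
  funext acc p
  congr 1
  funext a b
  exact hcomp a b

-- in a sorted list, everything surviving the dropWhile of the leading run is strictly larger
theorem dropWhile_gt (x : Int) : ∀ (rest : List Int), rest.Pairwise (· ≤ ·) →
    (∀ y ∈ rest, x ≤ y) → ∀ v ∈ rest.dropWhile (fun y => y == x), x < v := by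
  intro rest
  induction rest with
  | nil => intro _ _ v hv; simp at hv
  | cons a t ih =>
      intro hpw hx v hv
      obtain ⟨ha, ht⟩ := List.pairwise_cons.mp hpw
      rw [List.dropWhile_cons] at hv
      by_cases h : a = x
      · rw [if_pos (by simp [h])] at hv
        exact ih ht (fun y hy => hx y (List.mem_cons_of_mem a hy)) v hv
      · rw [if_neg (by simp [h])] at hv
        have hxa : x < a :=
          lt_of_le_of_ne (hx a (List.mem_cons_self)) (fun he => h he.symm)
        rcases List.mem_cons.mp hv with rfl | hvt
        · exact hxa
        · exact lt_of_lt_of_le hxa (ha v hvt)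

theorem mem_map_fst_pvRuns (w : Int) : ∀ (xs : List Int), w ∈ (pvRuns xs).map Prod.fst ↔ w ∈ xs := by
  intro xs
  induction xs using pvRuns.induct with
  | case1 => simp [pvRuns]
  | case2 v rest ih =>
      rw [pvRuns]
      simp only [List.map_cons, List.mem_cons, ih]
      constructor
      · rintro (rfl | hw)
        · exact Or.inl rfl
        · refine Or.inr ?_
          rw [← List.takeWhile_append_dropWhile (p := fun y => y == v) (l := rest)]
          exact List.mem_append_right _ hw
      · rintro (rfl | hw)
        · exact Or.inl rfl
        · conv at hw => rw [← List.takeWhile_append_dropWhile (p := fun y => y == v) (l := rest)]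
          rcases List.mem_append.mp hw with h1 | h2
          · exact Or.inl (by simpa using List.mem_takeWhile_imp h1)
          · exact Or.inr h2

theorem pairwise_lt_map_fst_pvRuns : ∀ (xs : List Int), xs.Pairwise (· ≤ ·) →
    ((pvRuns xs).map Prod.fst).Pairwise (· < ·) := by
  intro xs
  induction xs using pvRuns.induct with
  | case1 => intro _; simp [pvRuns]
  | case2 v rest ih =>
      intro hpw
      obtain ⟨ha, ht⟩ := List.pairwise_cons.mp hpw
      have hd : (rest.dropWhile (fun y => y == v)).Pairwise (· ≤ ·) :=
        List.Pairwise.sublist (List.dropWhile_sublist _) ht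
      rw [pvRuns]
      simp only [List.map_cons]
      refine List.pairwise_cons.mpr ⟨?_, ih hd⟩
      intro y hy
      have : y ∈ rest.dropWhile (fun y => y == v) := (mem_map_fst_pvRuns y _).mp hy
      exact dropWhile_gt v rest ht ha y this

theorem snd_pvRuns_eq_count : ∀ (xs : List Int), xs.Pairwise (· ≤ ·) →
    ∀ p ∈ pvRuns xs, p.2 = ((List.count p.1 xs : Nat) : Int) := by
  intro xs
  induction xs using pvRuns.induct with
  | case1 => intro _ p hp; simp [pvRuns] at hp
  | case2 v rest ih =>
      intro hpw p hp
      obtain ⟨ha, ht⟩ := List.pairwise_cons.mp hpw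
      have hd : (rest.dropWhile (fun y => y == v)).Pairwise (· ≤ ·) :=
        List.Pairwise.sublist (List.dropWhile_sublist _) ht
      have hsplit : rest.takeWhile (fun y => y == v) ++ rest.dropWhile (fun y => y == v) = rest :=
        List.takeWhile_append_dropWhile
      rw [pvRuns] at hp
      rcases List.mem_cons.mp hp with rfl | hp'
      · -- the head pair (v, 1 + run length)
        have htw : List.count v (rest.takeWhile (fun y => y == v))
            = (rest.takeWhile (fun y => y == v)).length :=
          List.count_eq_length.mpr (fun b hb => by
            have := List.mem_takeWhile_imp hb
            exact (eq_of_beq this).symm)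
        have hdw : List.count v (rest.dropWhile (fun y => y == v)) = 0 :=
          List.count_eq_zero.mpr (fun hmem =>
            lt_irrefl v (dropWhile_gt v rest ht ha v hmem))
        have hrc : List.count v rest
            = List.count v (rest.takeWhile (fun y => y == v))
              + List.count v (rest.dropWhile (fun y => y == v)) := by
          conv_lhs => rw [← hsplit]
          rw [List.count_append]
        have hcount : List.count v (v :: rest)
            = 1 + (rest.takeWhile (fun y => y == v)).length := by
          rw [List.count_cons_self, hrc, htw, hdw]
          omega
        simp only [hcount]
        push_cast
        ring
      · -- a pair of a later run
        have hih := ih hd p hp'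
        have hmem : p.1 ∈ rest.dropWhile (fun y => y == v) := by
          have : p.1 ∈ (pvRuns (rest.dropWhile (fun y => y == v))).map Prod.fst :=
            List.mem_map_of_mem hp'
          exact (mem_map_fst_pvRuns p.1 _).mp this
        have hgt : v < p.1 := dropWhile_gt v rest ht ha p.1 hmem
        have htw0 : List.count p.1 (rest.takeWhile (fun y => y == v)) = 0 :=
          List.count_eq_zero.mpr (fun hmem' => by
            have := List.mem_takeWhile_imp hmem'
            exact absurd (eq_of_beq this) (by intro h; exact lt_irrefl v (h ▸ hgt)))
        have hrc : List.count p.1 rest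
            = List.count p.1 (rest.takeWhile (fun y => y == v))
              + List.count p.1 (rest.dropWhile (fun y => y == v)) := by
          conv_lhs => rw [← hsplit]
          rw [List.count_append]
        have : List.count p.1 (v :: rest)
            = List.count p.1 (rest.dropWhile (fun y => y == v)) := by
          rw [List.count_cons_of_ne (by intro h; exact lt_irrefl v (h ▸ hgt)), hrc, htw0]
          omega
        rw [hih, this]

theorem list_reconstruct (f : Int → Int) : ∀ (l : List (Int × Int)),
    (∀ p ∈ l, p.2 = f p.1) → l = (l.map Prod.fst).map (fun w => (w, f w)) := by
  intro l
  induction l with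
  | nil => intro _; rfl
  | cons p t ih =>
      intro h
      have hp := h p List.mem_cons_self
      simp only [List.map_cons]
      rw [← ih (fun q hq => h q (List.mem_cons_of_mem p hq))]
      have : (p.1, f p.1) = p := by
        rw [← hp]
      rw [this]

theorem runs_perm_items (row : List Int) :
    (pvRuns (PySem.List.sorted (row.filter (fun v => !(v == 0))) (fun v => v) false)).Perm
      ((PySem.Set.ofList (row.filter (fun v => !(v == 0)))).map
        (fun k => (k, ((List.count k (row.filter (fun v => !(v == 0))) : Nat) : Int)))) := by
  have hs : (PySem.List.sorted (row.filter (fun v => !(v == 0))) (fun v => v) false).Pairwise (· ≤ ·) := by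
    simpa using PySem.List.sorted_pairwise (row.filter (fun v => !(v == 0))) (fun v => v)
  have hperm : (PySem.List.sorted (row.filter (fun v => !(v == 0))) (fun v => v) false).Perm
      (row.filter (fun v => !(v == 0))) :=
    PySem.List.sorted_perm _ _ _
  have hc : ∀ p ∈ pvRuns (PySem.List.sorted (row.filter (fun v => !(v == 0))) (fun v => v) false),
      p.2 = ((List.count p.1 (row.filter (fun v => !(v == 0))) : Nat) : Int) := by
    intro p hp
    rw [snd_pvRuns_eq_count _ hs p hp, hperm.count_eq]
  have hrec := list_reconstruct
    (fun w => ((List.count w (row.filter (fun v => !(v == 0))) : Nat) : Int)) _ hc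
  rw [hrec]
  refine List.Perm.map _ ?_
  refine (List.perm_ext_iff_of_nodup ?_ (PySem.Set.nodup_ofList _)).mpr ?_
  · exact (pairwise_lt_map_fst_pvRuns _ hs).imp (fun h => ne_of_lt h)
  · intro a
    rw [mem_map_fst_pvRuns, PySem.List.mem_sorted, PySem.Set.mem_ofList]

theorem lex_key_injective :
    Function.Injective (fun p : Int × Int => (toLex (p.2, p.1) : Lex (Int × Int))) := by
  intro a b h
  have h2 := toLex.injective h
  simp only [Prod.mk.injEq] at h2
  exact Prod.ext h2.2 h2.1

theorem row_eq (row : List Int) :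
    (PySem.List.sorted2
        (row.foldl (fun d j => if j == 0 then d else d.modify j 0 (· + 1)) PySem.Dict.empty).items
        (fun x => x.2) (fun x => x.1) false).foldl (fun acc rt => acc ++ [rt.1, rt.2]) []
      = (PySem.List.sorted2
          (pvRuns (PySem.List.sorted (row.filter (fun v => !(v == 0))) (fun v => v) false))
          (fun p => p.2) (fun p => p.1) false).flatMap (fun p => [p.1, p.2]) := by
  rw [PySem.List.foldl_append_eq_flatMap, List.nil_append]
  congr 1
  rw [dict_loop_eq_counter, PySem.Dict.items_counter]
  rw [sorted2_eq_sorted_lex, sorted2_eq_sorted_lex]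
  exact PySem.List.sorted_eq_sorted_of_perm _ _ _ lex_key_injective (runs_perm_items row).symm

-- ===== VERDICT (by name: the statement is the Claim_ definition above) =====
theorem r_play_spec : Claim_equal_r_play := by
  intro table _
  show r_play table = r_play_alt table
  have h := foldl_range_set_map
    (fun row =>
      (PySem.List.sorted2
          (row.foldl (fun d j => if j == 0 then d else d.modify j 0 (· + 1)) PySem.Dict.empty).items
          (fun x => x.2) (fun x => x.1) false).foldl (fun acc rt => acc ++ [rt.1, rt.2]) [])
    table []
  have h2 : table.map
      (fun row =>
        (PySem.List.sorted2
            (row.foldl (fun d j => if j == 0 then d else d.modify j 0 (· + 1)) PySem.Dict.empty).items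
            (fun x => x.2) (fun x => x.1) false).foldl (fun acc rt => acc ++ [rt.1, rt.2]) [])
      = table.map
      (fun row =>
        (PySem.List.sorted2
            (pvRuns (PySem.List.sorted (row.filter (fun v => !(v == 0))) (fun v => v) false))
            (fun p => p.2) (fun p => p.1) false).flatMap (fun p => [p.1, p.2])) :=
    List.map_congr_left (fun row _ => row_eq row)
  rw [List.nil_append] at h
  exact h.trans h2
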